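-- pv_equiv track=rewrite | github.com/Alex1-ai/My-Datastructure-Algorithm | AI-datastructure/column_matrix_traversal.py | column_traversal
-- ===== SOURCE A (Python) =====
-- def column_traversal(matrix):
--     rows, cols = len(matrix), len(matrix[0])
--     direction = "up"
--     row, col = rows - 1, cols - 1
--     output = []
--
--     while len(output) < rows * cols:
--         output.append(matrix[row][col])
--
--         if direction == "up":
--             if row - 1 < 0:
--                 direction = "down"
--                 col -= 1
--             else:
--                 row -= 1
--         else:
--             if row + 1 == rows:
--                 direction = "up"
--                 col -= 1
--             else:
--                 row += 1
--
--     return output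
-- ===== SOURCE B (Python) =====
-- def column_traversal(matrix):
--     rows, cols = len(matrix), len(matrix[0])
--     out = []
--     for i in range(cols):
--         c = cols - 1 - i
--         column = [matrix[r][c] for r in range(rows)]
--         out.extend(column[::-1] if i % 2 == 0 else column)
--     return out
-- ===== Notes on version B (the rewrite author's own statement) =====
-- stated objective: simpler
-- what changed: Replaces A's single while loop with a direction flag and row/col cursor state machine by a per-column decomposition: iterate columns right-to-left, build each full column top-to-bottom, reverse it when the traversal index is even, and extend the output.
import Mathlib
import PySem

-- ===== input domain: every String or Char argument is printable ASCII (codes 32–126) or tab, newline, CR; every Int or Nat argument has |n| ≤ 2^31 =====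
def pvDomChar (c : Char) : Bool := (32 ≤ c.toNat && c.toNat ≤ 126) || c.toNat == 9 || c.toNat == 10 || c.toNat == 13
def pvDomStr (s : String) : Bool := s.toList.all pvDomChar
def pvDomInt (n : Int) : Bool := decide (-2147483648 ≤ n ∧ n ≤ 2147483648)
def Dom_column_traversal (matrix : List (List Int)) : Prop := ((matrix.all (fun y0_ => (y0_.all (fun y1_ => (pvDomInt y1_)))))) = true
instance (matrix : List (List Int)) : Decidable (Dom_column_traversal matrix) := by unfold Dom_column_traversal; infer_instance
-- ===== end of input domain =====

-- B replaces A's direction-flag state machine (single while loop) by a per-column pass: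
-- columns right-to-left, each column list reversed on even traversal index (objective: simpler).

-- ===== PORT A =====
-- the while loop of A, fuel = rows*cols - len(output); acc holds output reversed
def pvLoopA : Nat → List (List Int) → Int → Bool → Int → Int → List Int → List Int
  | 0, _, _, _, _, _, acc => acc.reverse
  | n+1, M, rows, dirUp, row, col, acc =>
    let acc' := (PySem.List.pyGet? ((PySem.List.pyGet? M row).getD []) col).getD 0 :: acc
    if dirUp then
      if row - 1 < 0 then pvLoopA n M rows false row (col - 1) acc'
      else pvLoopA n M rows true (row - 1) col acc'
    else
      if row + 1 = rows then pvLoopA n M rows true row (col - 1) acc'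
      else pvLoopA n M rows false (row + 1) col acc'

def column_traversal (matrix : List (List Int)) : List Int :=
  let rows : Int := matrix.length
  let cols : Int := ((PySem.List.pyGet? matrix 0).getD []).length
  pvLoopA (rows * cols).toNat matrix rows true (rows - 1) (cols - 1) []

-- ===== PORT B =====
-- [matrix[r][c] for r in range(rows)]
def pvCol (M : List (List Int)) (rows : Nat) (c : Int) : List Int :=
  (List.range rows).map (fun r => (PySem.List.pyGet? ((PySem.List.pyGet? M (r : Int)).getD []) c).getD 0)

def column_traversal_alt (matrix : List (List Int)) : List Int :=
  let rows := matrix.length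
  let cols := ((PySem.List.pyGet? matrix 0).getD []).length
  (List.range cols).foldl (fun out (i : Nat) =>
    let c : Int := (cols : Int) - 1 - (i : Int)
    let column := pvCol matrix rows c
    out ++ (if i % 2 = 0 then column.reverse else column)) []

-- ===== PRECONDITION & SPEC =====
-- Pre_ excludes exactly the inputs where A raises: the empty matrix (IndexError on matrix[0])
-- and ragged matrices with some row shorter than the first (IndexError on matrix[row][col]).
def Pre_column_traversal (matrix : List (List Int)) : Prop :=
  matrix ≠ [] ∧ ∀ r ∈ matrix, ((PySem.List.pyGet? matrix 0).getD []).length ≤ r.length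
instance (matrix : List (List Int)) : Decidable (Pre_column_traversal matrix) := by
  unfold Pre_column_traversal; infer_instance
def pvWitness_column_traversal : List (List Int) := [[1, 2], [3, 4]]

def Spec_column_traversal (matrix : List (List Int)) (out : List Int) : Prop := out = column_traversal_alt matrix
instance (matrix : List (List Int)) (out : List Int) : Decidable (Spec_column_traversal matrix out) := by unfold Spec_column_traversal; infer_instance

-- ===== CLAIM (what is proved, stated in full; the proofs are below) =====
def Claim_equal_column_traversal : Prop := ∀ (matrix : List (List Int)), Dom_column_traversal matrix → Pre_column_traversal matrix → Spec_column_traversal matrix (column_traversal matrix)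

-- ===== LEMMAS AND PROOFS =====

-- matrix[r][c] with the ports' getD-defaults (defeq to the access in both ports)
def pvCell (M : List (List Int)) (r c : Int) : Int :=
  (PySem.List.pyGet? ((PySem.List.pyGet? M r).getD []) c).getD 0

-- the rows j, j+1, …, j+k-1 of column c
def pvColFrom (M : List (List Int)) (j k : Nat) (c : Int) : List Int :=
  (List.range' j k).map (fun r => pvCell M (r : Int) c)

-- pvBlocks M R m d : output of the remaining m columns (current column index m-1), direction d
def pvBlocks (M : List (List Int)) (R : Nat) : Nat → Bool → List Int
  | 0, _ => []
  | m + 1, d =>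
      (if d then (pvCol M R (m : Int)).reverse else pvCol M R (m : Int)) ++ pvBlocks M R m (!d)

theorem pvCol_succ (M : List (List Int)) (j : Nat) (c : Int) :
    pvCol M (j + 1) c = pvCol M j c ++ [pvCell M (j : Int) c] := by
  simp [pvCol, pvCell, List.range_succ]

theorem pvColFrom_succ (M : List (List Int)) (j k : Nat) (c : Int) :
    pvColFrom M j (k + 1) c = pvCell M (j : Int) c :: pvColFrom M (j + 1) k c := by
  simp [pvColFrom, List.range'_succ]

theorem pvColFrom_zero (M : List (List Int)) (R : Nat) (c : Int) :
    pvColFrom M 0 R c = pvCol M R c := by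
  simp [pvColFrom, pvCol, pvCell, ← List.range_eq_range']

theorem pvLoopA_up (M : List (List Int)) (R : Nat) :
    ∀ (j : Nat) (fuel : Nat) (c : Int) (acc : List Int),
    pvLoopA (j + 1 + fuel) M (R : Int) true (j : Int) c acc
      = pvLoopA fuel M (R : Int) false 0 (c - 1) (pvCol M (j + 1) c ++ acc) := by
  intro j
  induction j with
  | zero =>
      intro fuel c acc
      rw [show 0 + 1 + fuel = fuel + 1 by omega]
      have h1 : ((0 : Nat) : Int) - 1 < 0 := by norm_num
      simp only [pvLoopA, eq_self_iff_true, if_true, if_pos h1]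
      norm_num [pvCol, pvCell]
  | succ j ih =>
      intro fuel c acc
      rw [show j + 1 + 1 + fuel = (j + 1 + fuel) + 1 by omega]
      have h1 : ¬ (((j + 1 : Nat) : Int) - 1 < 0) := by push_cast; omega
      have h2 : ((j + 1 : Nat) : Int) - 1 = (j : Int) := by push_cast; ring
      simp only [pvLoopA, eq_self_iff_true, if_true, if_neg h1]
      have hx : (PySem.List.pyGet? ((PySem.List.pyGet? M ((j + 1 : Nat) : Int)).getD []) c).getD 0
          = pvCell M ((j + 1 : Nat) : Int) c := rfl
      rw [hx, h2, ih fuel c (pvCell M ((j + 1 : Nat) : Int) c :: acc)]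
      congr 1
      rw [pvCol_succ M (j + 1) c, List.append_assoc]
      rfl

theorem pvLoopA_down (M : List (List Int)) (R : Nat) :
    ∀ (k : Nat) (j : Nat), j + k = R → 1 ≤ k → ∀ (fuel : Nat) (c : Int) (acc : List Int),
    pvLoopA (k + fuel) M (R : Int) false (j : Int) c acc
      = pvLoopA fuel M (R : Int) true ((R : Int) - 1) (c - 1)
          ((pvColFrom M j k c).reverse ++ acc) := by
  intro k
  induction k with
  | zero => omega
  | succ k ih =>
      intro j hjk _ fuel c acc
      have hx : (PySem.List.pyGet? ((PySem.List.pyGet? M ((j : Nat) : Int)).getD []) c).getD 0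
          = pvCell M ((j : Nat) : Int) c := rfl
      by_cases hk : k = 0
      · subst hk
        have hj : (j : Int) + 1 = (R : Int) := by omega
        rw [show 1 + fuel = fuel + 1 by omega]
        simp only [pvLoopA, if_neg (show ¬ (false = true) by decide), if_pos hj]
        rw [hx, show ((R : Int) - 1) = (j : Int) by omega]
        simp [pvColFrom, List.range']
      · have hne : ¬ ((j : Int) + 1 = (R : Int)) := by omega
        rw [show (k + 1 + fuel) = (k + fuel) + 1 by omega]
        simp only [pvLoopA, if_neg (show ¬ (false = true) by decide), if_neg hne]
        have h2 : (j : Int) + 1 = ((j + 1 : Nat) : Int) := by push_cast; ring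
        rw [hx, h2, ih (j + 1) (by omega) (by omega) fuel c (pvCell M (j : Int) c :: acc)]
        congr 1
        rw [pvColFrom_succ]
        simp [List.reverse_cons, List.append_assoc]

theorem pvLoopA_cols (M : List (List Int)) (R : Nat) (hR : 1 ≤ R) :
    ∀ (m : Nat) (d : Bool) (acc : List Int),
    pvLoopA (R * m) M (R : Int) d (if d then (R : Int) - 1 else 0) ((m : Int) - 1) acc
      = acc.reverse ++ pvBlocks M R m d := by
  intro m
  induction m with
  | zero => intro d acc; simp [pvLoopA, pvBlocks]
  | succ m ih =>
      intro d acc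
      have hcol : ((m + 1 : Nat) : Int) - 1 = (m : Int) := by push_cast; ring
      cases d with
      | true =>
          rw [if_pos rfl, hcol,
              show R * (m + 1) = (R - 1) + 1 + R * m by rw [Nat.sub_add_cancel hR]; ring,
              show ((R : Int) - 1) = ((R - 1 : Nat) : Int) by omega,
              pvLoopA_up M R (R - 1) (R * m), Nat.sub_add_cancel hR]
          have hI := ih false (pvCol M R (m : Int) ++ acc)
          rw [if_neg (show ¬ (false = true) by decide)] at hI
          rw [hI]
          simp only [pvBlocks, if_pos rfl, Bool.not_true]
          simp [List.reverse_append, List.append_assoc]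
      | false =>
          rw [if_neg (show ¬ (false = true) by decide), hcol,
              show (0 : Int) = ((0 : Nat) : Int) by norm_num,
              show R * (m + 1) = R + R * m by ring,
              pvLoopA_down M R R 0 (by omega) hR (R * m)]
          have hI := ih true ((pvColFrom M 0 R (m : Int)).reverse ++ acc)
          rw [if_pos rfl] at hI
          rw [hI]
          simp only [pvBlocks, if_neg (show ¬ (false = true) by decide), Bool.not_false]
          rw [pvColFrom_zero]
          simp [List.reverse_append, List.append_assoc]

-- B's foldl as flattened blocks, then blocks = pvBlocks by induction with alternating parity
theorem pvAlt_eq_blocks (M : List (List Int)) (R : Nat) :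
    ∀ (m : Nat) (d : Bool),
    ((List.range m).map (fun (i : Nat) =>
        if (if i % 2 = 0 then d else !d)
        then (pvCol M R ((m : Int) - 1 - (i : Int))).reverse
        else pvCol M R ((m : Int) - 1 - (i : Int)))).flatten
      = pvBlocks M R m d := by
  intro m
  induction m with
  | zero => intro d; simp [pvBlocks]
  | succ m ih =>
      intro d
      rw [List.range_succ_eq_map, List.map_cons, List.map_map, List.flatten_cons]
      have h0 : ((m + 1 : Nat) : Int) - 1 - ((0 : Nat) : Int) = (m : Int) := by push_cast; ring
      rw [pvBlocks]
      congr 1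
      · rw [h0]
        norm_num
      · rw [← ih (!d)]
        congr 1
        apply List.map_congr_left
        intro i _
        simp only [Function.comp_apply, Nat.succ_eq_add_one]
        have hc : ((i + 1 : Nat) : Int) = (i : Int) + 1 := by push_cast; ring
        have hm : ((m + 1 : Nat) : Int) - 1 - ((i : Int) + 1) = (m : Int) - 1 - (i : Int) := by
          push_cast; ring
        by_cases hi : i % 2 = 0
        · rw [if_neg (show ¬ ((i + 1) % 2 = 0) by omega), if_pos hi, hc, hm]
        · rw [if_pos (show (i + 1) % 2 = 0 by omega), if_neg hi, hc, hm, Bool.not_not]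

theorem alt_eq (matrix : List (List Int)) :
    column_traversal_alt matrix
      = pvBlocks matrix matrix.length ((PySem.List.pyGet? matrix 0).getD []).length true := by
  unfold column_traversal_alt
  rw [PySem.List.foldl_append_eq_flatMap, List.nil_append, List.flatMap_def]
  rw [← pvAlt_eq_blocks matrix matrix.length ((PySem.List.pyGet? matrix 0).getD []).length true]
  congr 1
  apply List.map_congr_left
  intro i _
  by_cases hi : i % 2 = 0 <;> simp [hi]

-- ===== VERDICT (by name: the statement is the Claim_ definition above) =====
theorem column_traversal_spec : Claim_equal_column_traversal := by
  intro matrix _ hpre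
  unfold Spec_column_traversal
  rw [alt_eq]
  unfold column_traversal
  obtain ⟨hne, -⟩ := hpre
  have hR : 1 ≤ matrix.length := List.length_pos_iff.mpr hne
  have hfuel : ((matrix.length : Int) * (((PySem.List.pyGet? matrix 0).getD []).length : Int)).toNat
      = matrix.length * ((PySem.List.pyGet? matrix 0).getD []).length := by
    rw [← Int.natCast_mul, Int.toNat_natCast]
  simp only [hfuel]
  have hI := pvLoopA_cols matrix matrix.length hR ((PySem.List.pyGet? matrix 0).getD []).length true []
  rw [if_pos rfl] at hI
  rw [List.reverse_nil, List.nil_append] at hI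
  exact hI
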